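-- pv_equiv track=rewrite | github.com/981377660LMT/algorithm-study | 6_tree/前缀树trie/好题/Ghost.py | solve
-- ===== SOURCE A (Python) =====
-- from collections import defaultdict
-- from typing import List
--
-- def solve(words: List[str]) -> int:
--     def dfs(cur) -> bool:
--         if '#' in cur:
--             return False
--         return not any(dfs(node) for node in cur.values())  # 队手报什么都不能赢
--
--     Trie = lambda: defaultdict(Trie)
--     root = Trie()
--     for w in words:
--         cur = root
--         for c in w:
--             cur = cur[c]
--         cur = cur['#']
--
--     return any(dfs(node) for node in root.values())
-- ===== SOURCE B (Python) =====
-- def solve(words):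
--     # sentinel-terminated suffixes; recursive group-by-first-char, no trie built
--     return _any_bucket_wins([w + '#' for w in words])
--
--
-- def _any_bucket_wins(group):
--     # group: suffixes (each nonempty, ending in '#'); True iff some first-char move wins
--     if not group:
--         return False
--     c = group[0][0]
--     bucket = [s[1:] for s in group if s[0] == c]
--     rest = [s for s in group if s[0] != c]
--     return _node_wins(bucket) or _any_bucket_wins(rest)
--
--
-- def _node_wins(tails):
--     live = [s for s in tails if s]       # fully consumed words add no further moves
--     if any(s[0] == '#' for s in live):   # a word ends at this node: losing position
--         return False
--     return not _any_bucket_wins(live)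
-- ===== Notes on version B (the rewrite author's own statement) =====
-- stated objective: alternative
-- what changed: B drops A's mutable defaultdict trie and DFS entirely: it appends a '#' sentinel to each word and evaluates the game by direct recursion over lists of word suffixes, splitting off one first-character bucket at a time, so no trie is ever built.
import Mathlib
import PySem

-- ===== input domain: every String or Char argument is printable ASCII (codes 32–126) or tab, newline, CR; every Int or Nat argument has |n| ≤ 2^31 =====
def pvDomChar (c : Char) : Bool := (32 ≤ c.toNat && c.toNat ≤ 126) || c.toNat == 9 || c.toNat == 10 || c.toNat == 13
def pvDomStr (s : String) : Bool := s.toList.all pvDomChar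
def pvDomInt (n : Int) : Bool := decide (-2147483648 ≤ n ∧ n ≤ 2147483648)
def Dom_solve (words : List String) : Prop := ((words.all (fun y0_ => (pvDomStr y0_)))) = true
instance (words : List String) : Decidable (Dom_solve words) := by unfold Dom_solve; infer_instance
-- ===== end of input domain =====

-- B replaces A's mutable defaultdict trie by a direct recursive group-by-first-char game
-- evaluation over sentinel-terminated suffix lists (objective: alternative; return value only).

-- ===== PORT A =====
-- Trie node = association list (key, child) in insertion order, encoded child/sibling.
inductive PTrie : Type
  | nil : PTrie
  | cons : Char → PTrie → PTrie → PTrie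
deriving DecidableEq, Repr

-- cur[c] on a defaultdict: ensure key c (appended at the end if new, empty child) and
-- apply f to its child (path-copying model of Python's in-place mutation of the subtrie).
def updKey : PTrie → Char → (PTrie → PTrie) → PTrie
  | .nil, c, f => .cons c (f .nil) .nil
  | .cons c' ch rest, c, f =>
      if c' = c then .cons c' (f ch) rest else .cons c' ch (updKey rest c f)

-- the body of A's word loop: 'cur = root; for c in w: cur = cur[c]; cur = cur["#"]'
def insertW : PTrie → List Char → PTrie
  | t, [] => updKey t '#' (fun ch => ch)
  | t, c :: cs => updKey t c (fun ch => insertW ch cs)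

-- '#' in cur
def hasHash : PTrie → Bool
  | .nil => false
  | .cons c _ rest => c = '#' || hasHash rest

-- any(dfs(node) for node in cur.values()), with A's dfs inlined once
-- (dfs cur = if '#' in cur then False else not any(dfs over cur.values())).
def anyDfs : PTrie → Bool
  | .nil => false
  | .cons _ ch rest => (if hasHash ch then false else !(anyDfs ch)) || anyDfs rest

def solve (words : List String) : Bool :=
  let root := words.foldl (fun r w => insertW r w.toList) PTrie.nil
  anyDfs root

-- ===== PORT B =====
-- [s[1:] for s in group if s[0] == c]   (s[0] == c rendered head?-safely; "" never occurs in B's calls)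
def bucketOf (c : Char) (g : List (List Char)) : List (List Char) :=
  (g.filter (fun u => u.head? == some c)).map (fun u => u.drop 1)

-- [s for s in group if s[0] != c]
def dropOf (c : Char) (g : List (List Char)) : List (List Char) :=
  g.filter (fun u => !(u.head? == some c))

-- termination measure for the mutual recursion below
def pvMu (g : List (List Char)) : Nat := (g.map (fun s => s.length + 1)).sum

theorem pvMu_cons (u : List Char) (g : List (List Char)) :
    pvMu (u :: g) = u.length + 1 + pvMu g := by simp [pvMu]

theorem pvMu_filter_le (p : List Char → Bool) (g : List (List Char)) :
    pvMu (g.filter p) ≤ pvMu g := by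
  induction g with
  | nil => simp
  | cons u g ih =>
    rw [List.filter_cons]
    cases hp : p u <;> simp [pvMu_cons] <;> omega

theorem bucketOf_cons (c : Char) (u : List Char) (g : List (List Char)) :
    bucketOf c (u :: g)
      = if u.head? == some c then (u.drop 1) :: bucketOf c g else bucketOf c g := by
  simp only [bucketOf, List.filter_cons]
  split <;> simp

theorem pvMu_bucketOf_le (c : Char) (g : List (List Char)) :
    pvMu (bucketOf c g) ≤ pvMu g := by
  induction g with
  | nil => simp [bucketOf]
  | cons u g ih =>
    rw [bucketOf_cons]
    cases hp : (u.head? == some c) <;> simp [pvMu_cons]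
    · omega
    · have hd : (u.drop 1).length = u.length - 1 := by simp
      omega

theorem pvMu_bucketOf_lt (c : Char) (g : List (List Char))
    (h : ∃ u ∈ g, u.head? = some c) : pvMu (bucketOf c g) < pvMu g := by
  induction g with
  | nil => simp at h
  | cons u g ih =>
    rw [bucketOf_cons]
    by_cases hp : (u.head? == some c) = true
    · have hne : u ≠ [] := by intro e; subst e; simp at hp
      have hpos : 0 < u.length := List.length_pos_of_ne_nil hne
      have hd : (u.drop 1).length = u.length - 1 := by simp
      have hle := pvMu_bucketOf_le c g
      rw [if_pos hp, pvMu_cons, pvMu_cons]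
      omega
    · rw [if_neg hp]
      rcases h with ⟨v, hv, hvc⟩
      rw [List.mem_cons] at hv
      rcases hv with rfl | hv
      · simp [hvc] at hp
      · have := ih ⟨v, hv, hvc⟩
        rw [pvMu_cons]
        omega

-- unattach/filter bridge used only by the termination argument of nodeWins
theorem pvMu_unattach_filter (l : List (List Char)) (p : List Char → Bool) :
    (List.filter (fun x => p x.1) l.attach).unattach = l.filter p := by
  show ((l.attach.filter (fun x => p x.1)).map Subtype.val) = l.filter p
  have h := List.filter_map (f := (Subtype.val : {x // x ∈ l} → List Char)) (p := p) (l := l.attach)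
  simp only [Function.comp_def] at h
  rw [← h, List.attach_map_subtype_val]

theorem pvMu_dropOf_lt (c : Char) (s : List Char) (rest : List (List Char))
    (h : s.head? = some c) : pvMu (dropOf c (s :: rest)) < pvMu (s :: rest) := by
  have h0 : dropOf c (s :: rest) = dropOf c rest := by
    simp [dropOf, h]
  have h1 : pvMu (dropOf c rest) ≤ pvMu rest := by
    simpa [dropOf] using pvMu_filter_le (fun u => !(u.head? == some c)) rest
  rw [h0, pvMu_cons]
  omega

mutual
-- _any_bucket_wins(group)
def anyBucketWins : List (List Char) → Bool
  | [] => false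
  | s :: rest =>
    match hh : s.head? with
    | none => false  -- unreachable in B's calls (Python's group[0][0] would raise)
    | some c =>
        nodeWins (bucketOf c (s :: rest)) || anyBucketWins (dropOf c (s :: rest))
  termination_by g => 2 * pvMu g
  decreasing_by
  · have := pvMu_bucketOf_lt c (s :: rest) ⟨s, by simp, hh⟩
    omega
  · have := pvMu_dropOf_lt c s rest hh
    omega

-- _node_wins(tails)
def nodeWins (tails : List (List Char)) : Bool :=
  let live := tails.filter (fun u => !u.isEmpty)
  if live.any (fun u => u.head? == some '#') then false
  else !(anyBucketWins live)
  termination_by 2 * pvMu tails + 1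
  decreasing_by
  have h2 := pvMu_unattach_filter tails (fun u => !u.isEmpty)
  rw [h2]
  have := pvMu_filter_le (fun u => !u.isEmpty) tails
  omega
end

def solve_alt (words : List String) : Bool :=
  anyBucketWins (words.map (fun w => w.toList ++ ['#']))

-- ===== PRECONDITION & SPEC =====
def Spec_solve (words : List String) (out : Bool) : Prop := out = solve_alt words
instance (words : List String) (out : Bool) : Decidable (Spec_solve words out) := by unfold Spec_solve; infer_instance

-- ===== CLAIM (what is proved, stated in full; the proofs are below) =====
def Claim_equal_solve : Prop := ∀ (words : List String), Dom_solve words → Spec_solve words (solve words)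

-- ===== LEMMAS AND PROOFS =====

-- proof-side helper: insertion of a raw char path (no sentinel step)
def insertP : PTrie → List Char → PTrie
  | t, [] => t
  | t, c :: cs => updKey t c (fun ch => insertP ch cs)

theorem insertW_eq_insertP (cs : List Char) : ∀ t, insertW t cs = insertP t (cs ++ ['#']) := by
  induction cs with
  | nil => intro t; simp [insertW, insertP]
  | cons c cs ih => intro t; simp [insertW, insertP, ih]

-- trie accessors used only by the proofs
def keysT : PTrie → List Char
  | .nil => []
  | .cons c _ rest => c :: keysT rest

def getT : PTrie → Char → PTrie
  | .nil, _ => .nil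
  | .cons c' ch rest, c => if c' = c then ch else getT rest c

-- one dfs step of A, as a named function (dfs cur for a non-root node)
def dfsOne (t : PTrie) : Bool := if hasHash t then false else !(anyDfs t)

theorem keysT_updKey (t : PTrie) (c : Char) (f : PTrie → PTrie) :
    keysT (updKey t c f) = if c ∈ keysT t then keysT t else keysT t ++ [c] := by
  induction t with
  | nil => simp [updKey, keysT]
  | cons c' ch rest ihc ihr =>
    by_cases hc : c' = c
    · subst hc
      simp [updKey, keysT]
    · simp only [updKey, if_neg hc, keysT, ihr, List.mem_cons]
      by_cases hm : c ∈ keysT rest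
      · simp [hm]
      · have hc' : ¬ c = c' := fun e => hc (Eq.symm e)
        simp [hm, hc']

theorem getT_updKey (t : PTrie) (c c' : Char) (f : PTrie → PTrie) :
    getT (updKey t c f) c' = if c' = c then f (getT t c) else getT t c' := by
  induction t with
  | nil =>
    by_cases h : c' = c
    · subst h; simp [updKey, getT]
    · have h' : ¬ c = c' := fun e => h (Eq.symm e)
      simp [updKey, getT, h, h']
  | cons c0 ch rest ihc ihr =>
    by_cases h0 : c0 = c
    · subst h0
      by_cases h : c' = c0
      · subst h; simp [updKey, getT]
      · have h' : ¬ c0 = c' := fun e => h (Eq.symm e)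
        simp [updKey, getT, h, h']
    · by_cases h : c' = c
      · subst h
        have h0' : ¬ c0 = c' := fun e => h0 e
        simp [updKey, getT, h0, ihr, h0']
      · by_cases h1 : c0 = c'
        · subst h1; simp [updKey, getT, h0, h]
        · simp [updKey, getT, h0, h, h1, ihr]

theorem nodup_updKey (t : PTrie) (c : Char) (f : PTrie → PTrie)
    (h : (keysT t).Nodup) : (keysT (updKey t c f)).Nodup := by
  rw [keysT_updKey]
  split
  · exact h
  · next hc =>
      simp [List.nodup_append, h]
      intro a ha
      rintro rfl
      exact hc ha

theorem hasHash_eq (t : PTrie) : hasHash t = true ↔ '#' ∈ keysT t := by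
  induction t with
  | nil => simp [hasHash, keysT]
  | cons c ch rest ih1 ih2 =>
      simp only [hasHash, keysT, List.mem_cons, Bool.or_eq_true, decide_eq_true_eq, ih2]
      constructor
      · rintro (rfl | h)
        · exact Or.inl rfl
        · exact Or.inr h
      · rintro (rfl | h)
        · exact Or.inl rfl
        · exact Or.inr h

theorem mem_keysT_insertP (t : PTrie) (u : List Char) (c : Char) :
    c ∈ keysT (insertP t u) ↔ c ∈ keysT t ∨ u.head? = some c := by
  cases u with
  | nil => simp [insertP]
  | cons c0 cs =>
    show c ∈ keysT (updKey t c0 _) ↔ _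
    rw [keysT_updKey]
    by_cases hm : c0 ∈ keysT t
    · simp only [hm, if_pos, List.head?]
      constructor
      · exact Or.inl
      · rintro (h | h)
        · exact h
        · simp only [Option.some_inj] at h; subst h; exact hm
    · simp only [hm, if_neg, List.mem_append, List.mem_singleton, List.head?,
        Option.some_inj, not_false_iff]
      constructor
      · rintro (h | h)
        · exact Or.inl h
        · exact Or.inr h.symm
      · rintro (h | h)
        · exact Or.inl h
        · exact Or.inr h.symm

theorem getT_insertP (t : PTrie) (u : List Char) (c : Char) :
    getT (insertP t u) c
      = if u.head? == some c then insertP (getT t c) (u.drop 1) else getT t c := by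
  cases u with
  | nil => simp [insertP]
  | cons c0 cs =>
    show getT (updKey t c0 _) c = _
    rw [getT_updKey]
    by_cases h : c = c0
    · subst h; simp [List.head?]
    · have h' : ¬ c0 = c := fun e => h (Eq.symm e)
      simp [List.head?, h, h']

theorem nodup_insertP (t : PTrie) (u : List Char)
    (h : (keysT t).Nodup) : (keysT (insertP t u)).Nodup := by
  cases u with
  | nil => exact h
  | cons c cs => exact nodup_updKey t c _ h

theorem mem_keysT_foldl (ss : List (List Char)) : ∀ (t : PTrie) (c : Char),
    c ∈ keysT (List.foldl insertP t ss) ↔ c ∈ keysT t ∨ ∃ u ∈ ss, u.head? = some c := by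
  induction ss with
  | nil => simp
  | cons u ss ih =>
    intro t c
    rw [List.foldl_cons, ih, mem_keysT_insertP]
    simp only [List.mem_cons]
    constructor
    · rintro ((h | h) | ⟨v, hv, hvc⟩)
      · exact Or.inl h
      · exact Or.inr ⟨u, Or.inl rfl, h⟩
      · exact Or.inr ⟨v, Or.inr hv, hvc⟩
    · rintro (h | ⟨v, (rfl | hv), hvc⟩)
      · exact Or.inl (Or.inl h)
      · exact Or.inl (Or.inr hvc)
      · exact Or.inr ⟨v, hv, hvc⟩

theorem getT_foldl (ss : List (List Char)) : ∀ (t : PTrie) (c : Char),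
    getT (List.foldl insertP t ss) c = List.foldl insertP (getT t c) (bucketOf c ss) := by
  induction ss with
  | nil => intro t c; simp [bucketOf]
  | cons u ss ih =>
    intro t c
    rw [List.foldl_cons, ih, getT_insertP, bucketOf_cons]
    by_cases h : (u.head? == some c) = true
    · simp [h]
    · simp [h]

theorem nodup_foldl (ss : List (List Char)) : ∀ (t : PTrie),
    (keysT t).Nodup → (keysT (List.foldl insertP t ss)).Nodup := by
  induction ss with
  | nil => intro t h; exact h
  | cons u ss ih => intro t h; exact ih _ (nodup_insertP t u h)

-- any(dfs(node) for node in cur.values()) over a nodup-key trie = exists over its keys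
theorem anyDfs_eq (t : PTrie) (h : (keysT t).Nodup) :
    (anyDfs t = true ↔ ∃ c ∈ keysT t, dfsOne (getT t c) = true) := by
  induction t with
  | nil => simp [anyDfs, keysT]
  | cons c ch rest ihc ihr =>
    have hc : c ∉ keysT rest := (List.nodup_cons.mp (by simpa [keysT] using h)).1
    have hr := ihr (List.nodup_cons.mp (by simpa [keysT] using h)).2
    simp only [anyDfs, keysT, Bool.or_eq_true, List.mem_cons]
    constructor
    · rintro (h1 | h2)
      · exact ⟨c, Or.inl rfl, by simpa [getT, dfsOne] using h1⟩
      · rcases hr.mp h2 with ⟨c', hm, hd⟩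
        have hne : ¬ c = c' := fun e => hc (e ▸ hm)
        exact ⟨c', Or.inr hm, by simpa [getT, hne] using hd⟩
    · rintro ⟨c', hmem, hd⟩
      rcases hmem with rfl | hm
      · left; simpa [getT, dfsOne] using hd
      · right
        have hne : ¬ c = c' := fun e => hc (e ▸ hm)
        exact hr.mpr ⟨c', hm, by simpa [getT, hne] using hd⟩

theorem bucketOf_dropOf (c c0 : Char) (g : List (List Char)) (h : c ≠ c0) :
    bucketOf c (dropOf c0 g) = bucketOf c g := by
  simp only [bucketOf, dropOf, List.filter_filter]
  congr 1
  apply List.filter_congr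
  intro u _
  by_cases hu : u.head? = some c
  · simp [hu, h, fun e => h (Eq.symm e)]
  · simp [hu]

-- unfolding of B's _any_bucket_wins into an exists over the first characters present
theorem anyBucketWins_eq : ∀ (n : Nat) (g : List (List Char)), g.length ≤ n → [] ∉ g →
    (anyBucketWins g = true ↔
      ∃ c, (∃ u ∈ g, u.head? = some c) ∧ nodeWins (bucketOf c g) = true) := by
  intro n
  induction n with
  | zero =>
    intro g hg _
    cases g with
    | nil => simp [anyBucketWins]
    | cons s rest => simp at hg
  | succ n ih =>
    intro g hg hnil
    cases g with
    | nil => simp [anyBucketWins]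
    | cons s rest =>
      cases s with
      | nil => exact absurd (List.mem_cons_self) hnil
      | cons a as =>
        have hdrop : dropOf a (List.cons (a :: as) rest) = dropOf a rest := by
          simp [dropOf, List.filter_cons]
        have hlen : (dropOf a rest).length ≤ n := by
          have h1 : (dropOf a rest).length ≤ rest.length := by
            simpa [dropOf] using List.length_filter_le _ rest
          have h2 : rest.length ≤ n := by simpa using hg
          omega
        have hnil' : [] ∉ dropOf a rest := by
          intro hm
          have hmr : ([] : List Char) ∈ rest := by
            simp only [dropOf, List.mem_filter] at hm
            exact hm.1
          exact hnil (List.mem_cons.mpr (Or.inr hmr))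
        have IH := ih (dropOf a rest) hlen hnil'
        have hunf : anyBucketWins ((a :: as) :: rest)
            = (nodeWins (bucketOf a ((a :: as) :: rest))
               || anyBucketWins (dropOf a ((a :: as) :: rest))) := by
          simp [anyBucketWins]
        rw [hunf, hdrop, Bool.or_eq_true, IH]
        constructor
        · rintro (h1 | ⟨c, ⟨u, hu, huc⟩, hw⟩)
          · exact ⟨a, ⟨a :: as, List.mem_cons_self, rfl⟩, h1⟩
          · have hum : u ∈ rest ∧ ¬ u.head? = some a := by
              simpa [dropOf, List.mem_filter] using hu
            have hca : ¬ c = a := fun e => hum.2 (e ▸ huc)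
            refine ⟨c, ⟨u, List.mem_cons.mpr (Or.inr hum.1), huc⟩, ?_⟩
            have e1 : bucketOf c ((a :: as) :: rest) = bucketOf c rest := by
              rw [bucketOf_cons]
              have : ¬ a = c := fun e => hca (Eq.symm e)
              simp [this]
            have e2 : bucketOf c (dropOf a rest) = bucketOf c rest :=
              bucketOf_dropOf c a rest hca
            rw [e1, ← e2]
            exact hw
        · rintro ⟨c, ⟨u, hu, huc⟩, hw⟩
          by_cases hca : c = a
          · subst hca
            exact Or.inl hw
          · right
            have hne : ¬ u.head? = some a := by
              rw [huc]
              simp only [Option.some_inj]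
              exact hca
            have hur : u ∈ rest := by
              rcases List.mem_cons.mp hu with rfl | h
              · exact absurd rfl hne
              · exact h
            have e1 : bucketOf c ((a :: as) :: rest) = bucketOf c rest := by
              rw [bucketOf_cons]
              have : ¬ a = c := fun e => hca (Eq.symm e)
              simp [this]
            have e2 : bucketOf c (dropOf a rest) = bucketOf c rest :=
              bucketOf_dropOf c a rest hca
            refine ⟨c, ⟨u, ?_, huc⟩, ?_⟩
            · simp only [dropOf, List.mem_filter]
              exact ⟨hur, by simp [hne]⟩
            · rw [e2, ← e1]
              exact hw

theorem bucketOf_filter_nonempty (c : Char) (ss : List (List Char)) :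
    bucketOf c (ss.filter (fun u => !u.isEmpty)) = bucketOf c ss := by
  simp only [bucketOf, List.filter_filter]
  congr 1
  apply List.filter_congr
  intro u _
  cases u <;> simp

theorem any_hash_filter (b : List (List Char)) :
    ((b.filter (fun u => !u.isEmpty)).any (fun u => u.head? == some '#'))
      = b.any (fun u => u.head? == some '#') := by
  induction b with
  | nil => rfl
  | cons u b ih => cases u <;> simp [List.filter_cons, List.any_cons, ih]

theorem mem_keysT_foldl_nil (b : List (List Char)) (c : Char) :
    c ∈ keysT (List.foldl insertP PTrie.nil b) ↔ ∃ u ∈ b, u.head? = some c := by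
  rw [mem_keysT_foldl]
  simp [keysT]

theorem hasHash_foldl (b : List (List Char)) :
    hasHash (List.foldl insertP PTrie.nil b) = b.any (fun u => u.head? == some '#') := by
  by_cases hx : ∃ u ∈ b, u.head? = some '#'
  · have h1 : hasHash (List.foldl insertP PTrie.nil b) = true :=
      (hasHash_eq _).mpr ((mem_keysT_foldl_nil b '#').mpr hx)
    rw [h1]
    symm
    rw [List.any_eq_true]
    rcases hx with ⟨u, hu, hc⟩
    exact ⟨u, hu, by simp [hc]⟩
  · have h1 : ¬ hasHash (List.foldl insertP PTrie.nil b) = true := fun e =>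
      hx ((mem_keysT_foldl_nil b '#').mp ((hasHash_eq _).mp e))
    have h2 : ¬ b.any (fun u => u.head? == some '#') = true := fun e => by
      rcases List.any_eq_true.mp e with ⟨u, hu, hc⟩
      exact hx ⟨u, hu, by simpa using hc⟩
    simp only [Bool.not_eq_true] at h1 h2
    rw [h1, h2]

theorem exists_head_filter (ss : List (List Char)) (c : Char) :
    (∃ u ∈ ss.filter (fun u => !u.isEmpty), u.head? = some c) ↔ ∃ u ∈ ss, u.head? = some c := by
  constructor
  · rintro ⟨u, hu, hc⟩
    exact ⟨u, (List.mem_filter.mp hu).1, hc⟩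
  · rintro ⟨u, hu, hc⟩
    refine ⟨u, List.mem_filter.mpr ⟨hu, ?_⟩, hc⟩
    cases u
    · simp at hc
    · simp

theorem main_lemma : ∀ (n : Nat) (ss : List (List Char)), pvMu ss ≤ n →
    anyDfs (List.foldl insertP PTrie.nil ss)
      = anyBucketWins (ss.filter (fun u => !u.isEmpty)) := by
  intro n
  induction n with
  | zero =>
    intro ss h
    cases ss with
    | nil => simp [anyDfs, anyBucketWins]
    | cons u ss => rw [pvMu_cons] at h; omega
  | succ n ih =>
    intro ss h
    have hnodup : (keysT (List.foldl insertP PTrie.nil ss)).Nodup :=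
      nodup_foldl ss PTrie.nil (by simp [keysT])
    have hA := anyDfs_eq _ hnodup
    have hnil : [] ∉ ss.filter (fun u => !u.isEmpty) := by simp
    have hB := anyBucketWins_eq (ss.filter (fun u => !u.isEmpty)).length _ le_rfl hnil
    have key : ∀ c, (∃ u ∈ ss, u.head? = some c) →
        dfsOne (getT (List.foldl insertP PTrie.nil ss) c)
          = nodeWins (bucketOf c (ss.filter (fun u => !u.isEmpty))) := by
      intro c hc
      rw [getT_foldl]
      show dfsOne (List.foldl insertP PTrie.nil (bucketOf c ss)) = _
      rw [bucketOf_filter_nonempty]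
      have hμ : pvMu (bucketOf c ss) ≤ n := by
        have := pvMu_bucketOf_lt c ss hc
        omega
      have hrec := ih (bucketOf c ss) hμ
      rw [dfsOne, hasHash_foldl, hrec]
      conv_rhs => rw [nodeWins]
      rw [← any_hash_filter]
    have hstep : (∃ c ∈ keysT (List.foldl insertP PTrie.nil ss),
          dfsOne (getT (List.foldl insertP PTrie.nil ss) c) = true)
        ↔ ∃ c, (∃ u ∈ ss.filter (fun u => !u.isEmpty), u.head? = some c)
            ∧ nodeWins (bucketOf c (ss.filter (fun u => !u.isEmpty))) = true := by
      constructor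
      · rintro ⟨c, hm, hd⟩
        have hc : ∃ u ∈ ss, u.head? = some c := (mem_keysT_foldl_nil ss c).mp hm
        exact ⟨c, (exists_head_filter ss c).mpr hc, by rw [← key c hc]; exact hd⟩
      · rintro ⟨c, hm, hd⟩
        have hc : ∃ u ∈ ss, u.head? = some c := (exists_head_filter ss c).mp hm
        exact ⟨c, (mem_keysT_foldl_nil ss c).mpr hc, by rw [key c hc]; exact hd⟩
    have hiff := (hA.trans hstep).trans hB.symm
    cases hx : anyDfs (List.foldl insertP PTrie.nil ss) <;>
      cases hy : anyBucketWins (ss.filter fun u => !u.isEmpty) <;> simp_all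

theorem foldl_insertW_eq (words : List String) : ∀ (t : PTrie),
    List.foldl (fun r w => insertW r w.toList) t words
      = List.foldl insertP t (words.map (fun w => w.toList ++ ['#'])) := by
  induction words with
  | nil => intro t; rfl
  | cons w ws ih => intro t; simp [List.foldl_cons, insertW_eq_insertP, ih, List.foldl_map]

-- ===== VERDICT (by name: the statement is the Claim_ definition above) =====
theorem solve_spec : Claim_equal_solve := by
  intro words _
  unfold Spec_solve
  show solve words = solve_alt words
  simp only [solve, solve_alt]
  rw [foldl_insertW_eq]
  have hf : (words.map (fun w => w.toList ++ ['#'])).filter (fun u => !u.isEmpty)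
      = words.map (fun w => w.toList ++ ['#']) := by
    rw [List.filter_eq_self]
    intro u hu
    rcases List.mem_map.mp hu with ⟨w, _, rfl⟩
    simp
  have h := main_lemma (pvMu (words.map (fun w => w.toList ++ ['#'])))
    (words.map (fun w => w.toList ++ ['#'])) le_rfl
  rw [hf] at h
  exact h
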